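-- pv_equiv track=rewrite | github.com/hanchengxuan/COMP9021 | COMP9021/project/FinalQ8.py | is_heterosquare
-- ===== SOURCE A (Python) =====
-- def is_heterosquare(square):
--     '''
--     A heterosquare of order n is an arrangement of the integers 1 to n**2 in a square,
--     such that the rows, columns, and diagonals all sum to DIFFERENT values.
--     In contrast, magic squares have all these sums equal.
--
--     Conjunctions of inputs will be tested, so hard coding will not help.
--
--     >>> is_heterosquare([[1, 2, 3],\
--                          [8, 9, 4],\
--                          [7, 6, 5]])
--     True
--     >>> is_heterosquare([[1, 2, 3],\
--                          [9, 8, 4],\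
--                          [7, 6, 5]])
--     False
--     >>> is_heterosquare([[2, 1, 3, 4],\
--                          [5, 6, 7, 8],\
--                          [9, 10, 11, 12],\
--                          [13, 14, 15, 16]])
--     True
--     >>> is_heterosquare([[1, 2, 3, 4],\
--                          [5, 6, 7, 8],\
--                          [9, 10, 11, 12],\
--                          [13, 14, 15, 16]])
--     False
--     '''
--     sumrow=set()
--     sumcolumn=set()
--
--     sumdignal=set()
--     for i in square:
--         sumrow.add(sum(i))
--     for j in range(len(square[0])):
--         column=[]
--         for i in range(len(square)):
--             column.append(square[i][j])
--         sumcolumn.add(sum(column))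
--     digonals1=0
--     digonals2=0
--     for i in range(len(square)):
--
--         digonals1+=square[i][i]
--         digonals2+=square[i][len(square)-i-1]
--     sumdignal.add(digonals1)
--     sumdignal.add(digonals2)
--     totalsum=set()
--
--     for i in sumrow:
--         totalsum.add(i)
--     for j in sumcolumn:
--         totalsum.add(j)
--     for k in sumdignal:
--         totalsum.add(k)
--     if len(totalsum)==len(square)*2+2:
--         return True
--     else:
--         return False
-- ===== SOURCE B (Python) =====
-- def is_heterosquare(square):
--     n = len(square)
--     rowsums = []
--     colsums = [0] * n
--     diag1 = 0
--     diag2 = 0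
--     for i in range(n):
--         rs = 0
--         newcols = []
--         for j in range(n):
--             v = square[i][j]
--             rs += v
--             newcols.append(colsums[j] + v)
--             if i == j:
--                 diag1 += v
--             if i + j == n - 1:
--                 diag2 += v
--         rowsums.append(rs)
--         colsums = newcols
--     sums = sorted(rowsums + colsums + [diag1, diag2])
--     for k in range(len(sums) - 1):
--         if sums[k] == sums[k + 1]:
--             return False
--     return True
-- ===== Notes on version B (the rewrite author's own statement) =====
-- stated objective: alternative
-- what changed: B fuses A's three staged set-building passes into one nested loop carrying four running accumulators (rowsums, a colsums vector rebuilt per row, two diagonal totals) and replaces A's hash-set 'distinct count == 2n+2' test by sorting the 2n+2 sums and scanning adjacent pairs for a duplicate.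
-- outside the precondition, e.g. on is_heterosquare([[1, 2, 4]]): A returns True, B returns False
import Mathlib
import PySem

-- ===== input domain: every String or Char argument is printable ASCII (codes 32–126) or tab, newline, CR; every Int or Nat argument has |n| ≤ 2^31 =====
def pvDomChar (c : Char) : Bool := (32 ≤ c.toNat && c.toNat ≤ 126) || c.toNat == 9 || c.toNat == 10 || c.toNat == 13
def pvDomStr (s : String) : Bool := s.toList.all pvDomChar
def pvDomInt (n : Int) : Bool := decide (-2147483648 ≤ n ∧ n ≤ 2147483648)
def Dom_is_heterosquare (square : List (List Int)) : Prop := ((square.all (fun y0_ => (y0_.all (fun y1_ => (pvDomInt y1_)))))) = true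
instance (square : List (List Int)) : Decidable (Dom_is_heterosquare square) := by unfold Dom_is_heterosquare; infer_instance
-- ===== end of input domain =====

-- B fuses A's three staged set-building passes into ONE nested loop carrying four running
-- accumulators (row sums, a column-sum vector rebuilt per row, two diagonal totals) and replaces
-- A's 'number of distinct sums == 2n+2' set test by sorting the 2n+2 sums and scanning adjacent
-- pairs for a duplicate (objective: alternative).

-- ===== PORT A =====
-- pyGetD's default value is unreachable inside Pre_ (all indices are in range there);
-- on inputs where Python's square[i][j] raises IndexError, Pre_ is false.
def is_heterosquare (square : List (List Int)) : Bool :=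
  let sumrow : PySem.Set Int :=
    square.foldl (fun s i => PySem.Set.add s i.sum) PySem.Set.empty
  let sumcolumn : PySem.Set Int :=
    (PySem.List.pyRange 0 ((PySem.List.pyGetD square 0 []).length : Int)).foldl
      (fun s j =>
        PySem.Set.add s
          (((PySem.List.pyRange 0 (square.length : Int)).foldl
            (fun column i => column ++ [PySem.List.pyGetD (PySem.List.pyGetD square i []) j 0]) []).sum))
      PySem.Set.empty
  let ds :=
    (PySem.List.pyRange 0 (square.length : Int)).foldl
      (fun d i =>
        (d.1 + PySem.List.pyGetD (PySem.List.pyGetD square i []) i 0,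
         d.2 + PySem.List.pyGetD (PySem.List.pyGetD square i []) ((square.length : Int) - i - 1) 0))
      ((0 : Int), (0 : Int))
  let sumdignal : PySem.Set Int := PySem.Set.add (PySem.Set.add PySem.Set.empty ds.1) ds.2
  let totalsum : PySem.Set Int :=
    PySem.Set.update (PySem.Set.update (PySem.Set.update PySem.Set.empty sumrow) sumcolumn) sumdignal
  if totalsum.length = square.length * 2 + 2 then true else false

-- ===== PORT B =====
-- one nested loop; state = (rowsums, colsums, diag1, diag2), inner state = (rs, newcols, diag1, diag2)
def is_heterosquare_alt (square : List (List Int)) : Bool :=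
  let n := square.length
  let st :=
    (PySem.List.pyRange 0 (n : Int)).foldl
      (fun (st : List Int × List Int × Int × Int) i =>
        let inner :=
          (PySem.List.pyRange 0 (n : Int)).foldl
            (fun (t : Int × List Int × Int × Int) j =>
              let v := PySem.List.pyGetD (PySem.List.pyGetD square i []) j 0
              (t.1 + v,
               t.2.1 ++ [PySem.List.pyGetD st.2.1 j 0 + v],
               (if i = j then t.2.2.1 + v else t.2.2.1),
               (if i + j = (n : Int) - 1 then t.2.2.2 + v else t.2.2.2)))
            ((0 : Int), ([] : List Int), st.2.2.1, st.2.2.2)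
        (st.1 ++ [inner.1], inner.2.1, inner.2.2.1, inner.2.2.2))
      (([] : List Int), List.replicate n (0 : Int), (0 : Int), (0 : Int))
  let sums := PySem.List.sorted (st.1 ++ st.2.1 ++ [st.2.2.1, st.2.2.2]) (fun x => x) false
  (PySem.List.pyRange 0 ((sums.length : Int) - 1)).all
    (fun k => !(PySem.List.pyGetD sums k 0 == PySem.List.pyGetD sums (k + 1) 0))

-- ===== PRECONDITION & SPEC =====
-- Pre_ restricts to non-empty square matrices (every row as long as the number of rows), the
-- function's stated domain: on ragged or empty input A usually raises IndexError, and where it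
-- does return, its 'count == 2*len(square)+2' test on a non-square shape is a corner no caller
-- would specify (e.g. A accepts the 1×3 input [[1, 2, 4]] as a 'heterosquare'), so neither
-- A's nor B's value there is the one being claimed.
def Pre_is_heterosquare (square : List (List Int)) : Prop :=
  square ≠ [] ∧ ∀ r ∈ square, r.length = square.length
instance (square : List (List Int)) : Decidable (Pre_is_heterosquare square) := by
  unfold Pre_is_heterosquare; infer_instance

def pvWitness_is_heterosquare : List (List Int) := [[1, 2, 3], [8, 9, 4], [7, 6, 5]]

def Spec_is_heterosquare (square : List (List Int)) (out : Bool) : Prop := out = is_heterosquare_alt square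
instance (square : List (List Int)) (out : Bool) : Decidable (Spec_is_heterosquare square out) := by unfold Spec_is_heterosquare; infer_instance

-- ===== CLAIM (what is proved, stated in full; the proofs are below) =====
def Claim_equal_is_heterosquare : Prop := ∀ (square : List (List Int)), Dom_is_heterosquare square → Pre_is_heterosquare square → Spec_is_heterosquare square (is_heterosquare square)

-- ===== LEMMAS AND PROOFS =====

-- the canonical sums both ports are reduced to
def hsqG (square : List (List Int)) (i j : Nat) : Int := (square.getD i []).getD j 0
def hsqRow (square : List (List Int)) (n i : Nat) : Int := ((List.range n).map (hsqG square i)).sum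
def hsqCol (square : List (List Int)) (k j : Nat) : Int := ((List.range k).map (fun i => hsqG square i j)).sum
def hsqD1 (square : List (List Int)) (k : Nat) : Int := ((List.range k).map (fun i => hsqG square i i)).sum
def hsqD2 (square : List (List Int)) (n k : Nat) : Int := ((List.range k).map (fun i => hsqG square i (n - 1 - i))).sum
def hsqL (square : List (List Int)) (n : Nat) : List Int :=
  (List.range n).map (hsqRow square n) ++ (List.range n).map (hsqCol square n)
    ++ [hsqD1 square n, hsqD2 square n n]

-- reading every index of a list in order rebuilds the list
theorem hsq_map_getD_range {α : Type} (l : List α) (d : α) :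
    (List.range l.length).map (fun i => l.getD i d) = l := by
  apply List.ext_getElem
  · simp
  · intro i h1 h2
    simp [List.getD_eq_getElem?_getD, List.getElem?_eq_getElem h2]

-- two duplicate-free lists with the same members have the same length
theorem hsq_length_eq_of_mem_iff (l1 l2 : List Int) (h1 : l1.Nodup) (h2 : l2.Nodup)
    (h : ∀ y, y ∈ l1 ↔ y ∈ l2) : l1.length = l2.length := by
  rw [← List.toFinset_card_of_nodup h1, ← List.toFinset_card_of_nodup h2]
  congr 1
  ext y
  simp only [List.mem_toFinset]
  exact h y

-- the 'distinct count = full count' test IS Nodup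
theorem hsq_ofList_length (L : List Int) :
    ((PySem.Set.ofList L).length = L.length) ↔ L.Nodup := by
  have hn : (PySem.Set.ofList L).Nodup := PySem.Set.nodup_ofList L
  have hf : (PySem.Set.ofList L).toFinset = L.dedup.toFinset := by
    ext y; simp [PySem.Set.mem_ofList, List.mem_dedup]
  have h1 : (PySem.Set.ofList L).length = L.dedup.length := by
    rw [← List.toFinset_card_of_nodup hn, ← List.toFinset_card_of_nodup (List.nodup_dedup L), hf]
  rw [h1]
  constructor
  · intro h
    have := List.Sublist.eq_of_length (List.dedup_sublist L) h
    rw [← this]; exact List.nodup_dedup L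
  · intro h; rw [List.dedup_eq_self.mpr h]

-- the distinct-count comparison of A decides Nodup of the 2n+2 sums
theorem hsq_final (RS CS : List Int) (d1 d2 : Int) (n : Nat)
    (hRS : RS.length = n) (hCS : CS.length = n) :
    (if (PySem.Set.update (PySem.Set.update (PySem.Set.update PySem.Set.empty (PySem.Set.ofList RS)) (PySem.Set.ofList CS)) (PySem.Set.add (PySem.Set.add PySem.Set.empty d1) d2)).length = n * 2 + 2 then true else false)
    = decide (RS ++ CS ++ [d1, d2]).Nodup := by
  have hno : List.Nodup (PySem.Set.update (PySem.Set.update (PySem.Set.update PySem.Set.empty (PySem.Set.ofList RS)) (PySem.Set.ofList CS)) (PySem.Set.add (PySem.Set.add PySem.Set.empty d1) d2)) := by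
    apply PySem.Set.nodup_update
    apply PySem.Set.nodup_update
    apply PySem.Set.nodup_update
    exact List.nodup_nil
  have hmem : ∀ y, y ∈ (PySem.Set.update (PySem.Set.update (PySem.Set.update PySem.Set.empty (PySem.Set.ofList RS)) (PySem.Set.ofList CS)) (PySem.Set.add (PySem.Set.add PySem.Set.empty d1) d2)) ↔ y ∈ PySem.Set.ofList (RS ++ CS ++ [d1, d2]) := by
    intro y
    simp only [PySem.Set.mem_update, PySem.Set.mem_ofList, PySem.Set.mem_add, List.mem_append,
      List.mem_cons, List.not_mem_nil, PySem.Set.empty]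
    tauto
  have hlen := hsq_length_eq_of_mem_iff _ _ hno (PySem.Set.nodup_ofList _) hmem
  have hL : (RS ++ CS ++ [d1, d2]).length = n * 2 + 2 := by
    simp [hRS, hCS]; omega
  rw [hlen, ← hL, Bool.eq_iff_iff]
  simp only [Bool.if_true_left, Bool.or_eq_true, decide_eq_true_eq]
  constructor
  · intro h
    rcases h with h | h
    · exact (hsq_ofList_length _).mp h
    · simp at h
  · intro h
    exact Or.inl ((hsq_ofList_length _).mpr h)

-- A reduces to 'the 2n+2 canonical sums are distinct'
theorem hsq_A (square : List (List Int)) (hne : square ≠ [])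
    (hrow : ∀ r ∈ square, r.length = square.length) :
    is_heterosquare square = decide (hsqL square square.length).Nodup := by
  have hnpos : 0 < square.length := List.length_pos_iff.mpr hne
  unfold is_heterosquare
  simp only [PySem.List.pyRange_zero_natCast]
  have hm : (PySem.List.pyGetD square 0 []).length = square.length := by
    rw [show PySem.List.pyGetD square 0 [] = square.getD 0 [] by
      simpa using PySem.List.pyGetD_natCast square 0 ([] : List Int)]
    refine hrow _ ?_
    cases square with
    | nil => exact absurd rfl hne
    | cons a t => simp [List.getD]
  rw [hm]
  -- row sums
  have hrs : List.foldl (fun (s : PySem.Set Int) i => s.add i.sum) PySem.Set.empty square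
      = PySem.Set.ofList (square.map (fun row => row.sum)) := by
    rw [PySem.Set.ofList_eq_foldl, List.foldl_map]
    rfl
  have hRSeq : square.map (fun row => row.sum)
      = (List.range square.length).map (hsqRow square square.length) := by
    conv_lhs => rw [← hsq_map_getD_range square ([] : List Int), List.map_map]
    apply List.map_congr_left
    intro i hi
    rw [List.mem_range] at hi
    have hrl : (square.getD i []).length = square.length := by
      refine hrow _ ?_
      rw [List.getD_eq_getElem?_getD, List.getElem?_eq_getElem hi]
      simp
    show (square.getD i []).sum = hsqRow square square.length i
    rw [hsqRow]
    conv_lhs => rw [← hsq_map_getD_range (square.getD i []) (0 : Int)]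
    rw [hrl]
    rfl
  rw [hrs, hRSeq]
  -- column sums
  have hinner : ∀ j : Int,
      (List.foldl (fun column i => column ++ [PySem.List.pyGetD (PySem.List.pyGetD square i []) j 0])
        [] (List.map (fun k : Nat => (k : Int)) (List.range square.length)))
      = List.map (fun i => PySem.List.pyGetD (PySem.List.pyGetD square i []) j 0)
          (List.map (fun k : Nat => (k : Int)) (List.range square.length)) := by
    intro j
    rw [PySem.List.foldl_append_singleton_eq_map]
    simp
  simp only [hinner]
  have houter : List.foldl (fun (s : PySem.Set Int) j =>
        s.add (List.map (fun i => PySem.List.pyGetD (PySem.List.pyGetD square i []) j 0)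
          (List.map (fun k : Nat => (k : Int)) (List.range square.length))).sum)
      PySem.Set.empty (List.map (fun k : Nat => (k : Int)) (List.range square.length))
      = PySem.Set.ofList ((List.map (fun k : Nat => (k : Int)) (List.range square.length)).map
          (fun j => (List.map (fun i => PySem.List.pyGetD (PySem.List.pyGetD square i []) j 0)
            (List.map (fun k : Nat => (k : Int)) (List.range square.length))).sum)) := by
    rw [PySem.Set.ofList_eq_foldl]
    conv_rhs => rw [List.foldl_map]
    rfl
  rw [houter]
  have hCSeq : ((List.map (fun k : Nat => (k : Int)) (List.range square.length)).map
          (fun j => (List.map (fun i => PySem.List.pyGetD (PySem.List.pyGetD square i []) j 0)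
            (List.map (fun k : Nat => (k : Int)) (List.range square.length))).sum))
      = (List.range square.length).map (hsqCol square square.length) := by
    rw [List.map_map]
    apply List.map_congr_left
    intro j hj
    simp only [Function.comp_apply, List.map_map]
    rw [hsqCol]
    congr 1
    apply List.map_congr_left
    intro i hi
    simp [Function.comp, hsqG]
  rw [hCSeq]
  -- diagonals
  have hds : List.foldl (fun (d : Int × Int) i =>
        (d.1 + PySem.List.pyGetD (PySem.List.pyGetD square i []) i 0,
         d.2 + PySem.List.pyGetD (PySem.List.pyGetD square i []) ((square.length : Int) - i - 1) 0))
      ((0 : Int), (0 : Int)) (List.map (fun k : Nat => (k : Int)) (List.range square.length))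
      = (hsqD1 square square.length, hsqD2 square square.length square.length) := by
    rw [PySem.List.foldl_prod_mk
      (f := fun (a : Int) i => a + PySem.List.pyGetD (PySem.List.pyGetD square i []) i 0)
      (g := fun (a : Int) i => a + PySem.List.pyGetD (PySem.List.pyGetD square i []) ((square.length : Int) - i - 1) 0)]
    rw [PySem.List.foldl_add, PySem.List.foldl_add]
    refine Prod.ext ?_ ?_
    · simp only [List.map_map, zero_add]
      rw [hsqD1]
      congr 1
      apply List.map_congr_left
      intro i hi
      simp [Function.comp, hsqG]
    · simp only [List.map_map, zero_add]
      rw [hsqD2]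
      congr 1
      apply List.map_congr_left
      intro i hi
      rw [List.mem_range] at hi
      show PySem.List.pyGetD (PySem.List.pyGetD square (i : Int) []) ((square.length : Int) - (i : Int) - 1) 0
          = hsqG square i (square.length - 1 - i)
      rw [show ((square.length : Int) - (i : Int) - 1) = ((square.length - 1 - i : Nat) : Int) by omega]
      simp [hsqG]
  rw [hds]
  have h2 := hsq_final ((List.range square.length).map (hsqRow square square.length))
    ((List.range square.length).map (hsqCol square square.length))
    (hsqD1 square square.length) (hsqD2 square square.length square.length)
    square.length (by simp) (by simp)
  rw [h2]
  rfl

-- filtering a range for its one hit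
theorem hsq_filter_singleton (n i : Nat) (hi : i < n) (p : Int → Bool)
    (hp : ∀ x : Int, p x = true ↔ x = (i : Int)) :
    ((List.range n).map (fun k : Nat => (k : Int))).filter p = [(i : Int)] := by
  induction n with
  | zero => omega
  | succ m ih =>
    rw [List.range_succ]
    simp only [List.map_append, List.filter_append]
    rcases Nat.lt_or_ge i m with h | h
    · rw [ih h]
      have : p (m : Int) = false := by
        rcases Bool.eq_false_or_eq_true (p (m : Int)) with hb | hb
        · exfalso
          have := (hp _).mp hb
          have : m = i := by exact_mod_cast this
          omega
        · exact hb
      simp [this]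
    · have hieq : i = m := by omega
      subst hieq
      have h0 : ((List.range i).map (fun k : Nat => (k : Int))).filter p = [] := by
        rw [List.filter_eq_nil_iff]
        intro a ha
        rcases List.mem_map.mp ha with ⟨k, hk, rfl⟩
        rw [List.mem_range] at hk
        rcases Bool.eq_false_or_eq_true (p (k : Int)) with hb | hb
        · exfalso
          have : k = i := by exact_mod_cast (hp _).mp hb
          omega
        · simp [hb]
      rw [h0]
      simp [(hp _).mpr rfl]

-- one step of B's fused loop: the inner j-loop updates the four accumulators
theorem hsq_inner (square : List (List Int)) (n i : Nat) (hi : i < n)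
    (cs : List Int) (d1 d2 : Int) :
    ((List.range n).map (fun x : Nat => (x : Int))).foldl
      (fun (t : Int × List Int × Int × Int) j =>
        (t.1 + PySem.List.pyGetD (PySem.List.pyGetD square (i : Int) []) j 0,
         t.2.1 ++ [PySem.List.pyGetD cs j 0 + PySem.List.pyGetD (PySem.List.pyGetD square (i : Int) []) j 0],
         (if (i : Int) = j then t.2.2.1 + PySem.List.pyGetD (PySem.List.pyGetD square (i : Int) []) j 0 else t.2.2.1),
         (if (i : Int) + j = (n : Int) - 1 then t.2.2.2 + PySem.List.pyGetD (PySem.List.pyGetD square (i : Int) []) j 0 else t.2.2.2)))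
      ((0 : Int), ([] : List Int), d1, d2)
    = (hsqRow square n i,
       (List.range n).map (fun j => cs.getD j 0 + hsqG square i j),
       d1 + hsqG square i i,
       d2 + hsqG square i (n - 1 - i)) := by
  rw [PySem.List.foldl_prod_mk
    (f := fun (a : Int) j => a + PySem.List.pyGetD (PySem.List.pyGetD square (i : Int) []) j 0)
    (g := fun (t2 : List Int × Int × Int) j =>
      (t2.1 ++ [PySem.List.pyGetD cs j 0 + PySem.List.pyGetD (PySem.List.pyGetD square (i : Int) []) j 0],
       (if (i : Int) = j then t2.2.1 + PySem.List.pyGetD (PySem.List.pyGetD square (i : Int) []) j 0 else t2.2.1),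
       (if (i : Int) + j = (n : Int) - 1 then t2.2.2 + PySem.List.pyGetD (PySem.List.pyGetD square (i : Int) []) j 0 else t2.2.2)))]
  rw [PySem.List.foldl_prod_mk
    (f := fun (a : List Int) j => a ++ [PySem.List.pyGetD cs j 0 + PySem.List.pyGetD (PySem.List.pyGetD square (i : Int) []) j 0])
    (g := fun (t3 : Int × Int) j =>
      ((if (i : Int) = j then t3.1 + PySem.List.pyGetD (PySem.List.pyGetD square (i : Int) []) j 0 else t3.1),
       (if (i : Int) + j = (n : Int) - 1 then t3.2 + PySem.List.pyGetD (PySem.List.pyGetD square (i : Int) []) j 0 else t3.2)))]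
  rw [PySem.List.foldl_prod_mk
    (f := fun (a : Int) j => (if (i : Int) = j then a + PySem.List.pyGetD (PySem.List.pyGetD square (i : Int) []) j 0 else a))
    (g := fun (a : Int) j => (if (i : Int) + j = (n : Int) - 1 then a + PySem.List.pyGetD (PySem.List.pyGetD square (i : Int) []) j 0 else a))]
  refine Prod.ext ?_ (Prod.ext ?_ (Prod.ext ?_ ?_))
  · -- row sum
    rw [PySem.List.foldl_add]
    simp only [List.map_map]
    rw [hsqRow]
    rw [List.map_congr_left (fun k hk => by
      simp [Function.comp, hsqG] : ∀ k ∈ List.range n,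
        ((fun j => PySem.List.pyGetD (PySem.List.pyGetD square (i : Int) []) j 0) ∘ (fun x : Nat => (x : Int))) k = hsqG square i k)]
    simp
  · -- column sums
    rw [PySem.List.foldl_append_singleton_eq_map]
    simp only [List.map_map, List.nil_append]
    apply List.map_congr_left
    intro k hk
    simp [Function.comp, hsqG]
  · -- main diagonal
    rw [PySem.List.foldl_ite_eq_foldl_filter (p := fun j => (i : Int) = j)]
    rw [hsq_filter_singleton n i hi _ (fun x => by simp [eq_comm])]
    simp [hsqG]
  · -- anti-diagonal
    rw [PySem.List.foldl_ite_eq_foldl_filter (p := fun j => (i : Int) + j = (n : Int) - 1)]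
    rw [hsq_filter_singleton n (n - 1 - i) (by omega) _ (fun x => by
      constructor
      · intro h
        have h' : (i : Int) + x = (n : Int) - 1 := by simpa using h
        omega
      · intro h
        subst h
        simp only [decide_eq_true_eq]
        omega)]
    simp [hsqG]

-- B's outer loop invariant, instantiated at the full row count
theorem hsq_outer (square : List (List Int)) (n k : Nat) (hk : k ≤ n) :
    ((List.range k).map (fun x : Nat => (x : Int))).foldl
      (fun (st : List Int × List Int × Int × Int) i =>
        let inner :=
          ((List.range n).map (fun x : Nat => (x : Int))).foldl
            (fun (t : Int × List Int × Int × Int) j =>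
              (t.1 + PySem.List.pyGetD (PySem.List.pyGetD square i []) j 0,
               t.2.1 ++ [PySem.List.pyGetD st.2.1 j 0 + PySem.List.pyGetD (PySem.List.pyGetD square i []) j 0],
               (if i = j then t.2.2.1 + PySem.List.pyGetD (PySem.List.pyGetD square i []) j 0 else t.2.2.1),
               (if i + j = (n : Int) - 1 then t.2.2.2 + PySem.List.pyGetD (PySem.List.pyGetD square i []) j 0 else t.2.2.2)))
            ((0 : Int), ([] : List Int), st.2.2.1, st.2.2.2)
        (st.1 ++ [inner.1], inner.2.1, inner.2.2.1, inner.2.2.2))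
      (([] : List Int), List.replicate n (0 : Int), (0 : Int), (0 : Int))
    = ((List.range k).map (hsqRow square n),
       (List.range n).map (hsqCol square k),
       hsqD1 square k, hsqD2 square n k) := by
  induction k with
  | zero =>
    simp only [List.range_zero, List.map_nil, List.foldl_nil]
    refine Prod.ext rfl (Prod.ext ?_ (Prod.ext rfl rfl))
    simp only []
    rw [show (List.range n).map (hsqCol square 0) = (List.range n).map (fun _ => (0 : Int)) from
      List.map_congr_left (fun j hj => by simp [hsqCol])]
    simp [List.map_const']
  | succ m ih =>
    have hm : m < n := by omega
    rw [List.range_succ, List.map_append, List.foldl_append, ih (by omega)]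
    simp only [List.map_cons, List.map_nil, List.foldl_cons, List.foldl_nil]
    rw [hsq_inner square n m hm ((List.range n).map (hsqCol square m)) (hsqD1 square m) (hsqD2 square n m)]
    refine Prod.ext ?_ (Prod.ext ?_ (Prod.ext ?_ ?_))
    · simp
    · simp only []
      apply List.map_congr_left
      intro j hj
      rw [List.mem_range] at hj
      rw [List.getD_eq_getElem?_getD, List.getElem?_map,
        List.getElem?_eq_getElem (by simpa using hj : j < (List.range n).length)]
      simp only [List.getElem_range, Option.map_some, Option.getD_some]
      rw [hsqCol, hsqCol, List.range_succ, List.map_append]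
      simp
    · simp only []
      rw [hsqD1, hsqD1, List.range_succ, List.map_append]
      simp
    · simp only []
      rw [hsqD2, hsqD2, List.range_succ, List.map_append]
      simp

-- B's fold reduces to the same canonical sums, then the sort-and-scan test
theorem hsq_B_fold (square : List (List Int)) :
    is_heterosquare_alt square
      = (PySem.List.pyRange 0 (((PySem.List.sorted (hsqL square square.length) (fun x => x) false).length : Int) - 1)).all
          (fun k => !(PySem.List.pyGetD (PySem.List.sorted (hsqL square square.length) (fun x => x) false) k 0
                      == PySem.List.pyGetD (PySem.List.sorted (hsqL square square.length) (fun x => x) false) (k + 1) 0)) := by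
  unfold is_heterosquare_alt
  simp only [PySem.List.pyRange_zero_natCast]
  rw [hsq_outer square square.length square.length le_rfl]
  unfold hsqL
  rfl

-- the adjacent-duplicate scan of a sorted list decides Nodup
theorem hsq_scan (L : List Int) :
    (PySem.List.pyRange 0 (((PySem.List.sorted L (fun x => x) false).length : Int) - 1)).all
        (fun k => !(PySem.List.pyGetD (PySem.List.sorted L (fun x => x) false) k 0
                    == PySem.List.pyGetD (PySem.List.sorted L (fun x => x) false) (k + 1) 0))
      = decide L.Nodup := by
  set S := PySem.List.sorted L (fun x => x) false with hS
  have hperm := PySem.List.sorted_perm L (fun x => x) false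
  rcases Nat.eq_zero_or_pos S.length with h0 | hpos
  · have hLnil : L = [] := by
      have := hperm.length_eq
      rw [← hS] at this
      have : L.length = 0 := by omega
      exact List.length_eq_zero_iff.mp this
    subst hLnil
    have : S = [] := by
      rw [hS]; rfl
    rw [this]
    simp [PySem.List.pyRange_one_eq_nil]
  · have hcast : ((S.length : Int) - 1) = ((S.length - 1 : Nat) : Int) := by omega
    rw [hcast, PySem.List.pyRange_zero_natCast, List.all_map]
    have hiff : (∀ k ∈ List.range (S.length - 1),
        ((fun k : Int => !(PySem.List.pyGetD S k 0 == PySem.List.pyGetD S (k + 1) 0)) ∘ (fun k : Nat => (k : Int))) k = true)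
        ↔ L.Nodup := by
      rw [← hperm.nodup_iff]
      constructor
      · intro h
        refine List.pairwise_iff_getElem.mpr ?_
        intro i j hi hj hij
        have hj' : j < S.length := by rw [hS]; exact hj
        have h1 : i ∈ List.range (S.length - 1) := by rw [List.mem_range]; omega
        have hi1 : i + 1 < S.length := by omega
        have hk := h i h1
        simp only [Function.comp_apply] at hk
        rw [show ((i : Int) + 1) = ((i + 1 : Nat) : Int) by push_cast; ring] at hk
        rw [PySem.List.pyGetD_natCast, PySem.List.pyGetD_natCast] at hk
        rw [List.getD_eq_getElem S 0 hi, List.getD_eq_getElem S 0 hi1] at hk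
        have hne : S[i] ≠ S[i+1] := by simpa using hk
        have hle1 : S[i] ≤ S[i+1] := PySem.List.sorted_id_getElem_mono L (by omega) (by rw [← hS]; exact hi1)
        have hle2 : S[i+1] ≤ S[j] := PySem.List.sorted_id_getElem_mono L (by omega) (by rw [← hS]; exact hj')
        exact ne_of_lt (lt_of_lt_of_le (lt_of_le_of_ne hle1 hne) hle2)
      · intro h k hk
        rw [List.mem_range] at hk
        have hk1 : k < S.length := by omega
        have hk2 : k + 1 < S.length := by omega
        simp only [Function.comp_apply]
        rw [show ((k : Int) + 1) = ((k + 1 : Nat) : Int) by push_cast; ring]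
        rw [PySem.List.pyGetD_natCast, PySem.List.pyGetD_natCast]
        rw [List.getD_eq_getElem S 0 hk1, List.getD_eq_getElem S 0 hk2]
        have := List.pairwise_iff_getElem.mp h k (k+1) hk1 hk2 (by omega)
        simpa using this
    rw [Bool.eq_iff_iff]
    simp only [List.all_eq_true, decide_eq_true_eq]
    exact hiff

-- ===== VERDICT (by name: the statement is the Claim_ definition above) =====
theorem is_heterosquare_spec : Claim_equal_is_heterosquare := by
  intro square _ hpre
  obtain ⟨hne, hrow⟩ := hpre
  unfold Spec_is_heterosquare
  rw [hsq_A square hne hrow, hsq_B_fold square, hsq_scan]
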